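-- pv_equiv track=rewrite | github.com/aayushman-singh/project-NARC | ml/utils.py | categorize_severity
-- ===== SOURCE A (Python) =====
-- from typing import List, Dict
--
-- def categorize_severity(categories: List[str]) -> str:
--     severity_mapping = {"hate_speech": "high", "explicit_content": "medium", "misinformation": "low"}
--     severities = [severity_mapping.get(cat, "low") for cat in categories]
--     if "high" in severities:
--         return "high"
--     elif "medium" in severities:
--         return "medium"
--     else:
--         return "low"
-- ===== SOURCE B (Python) =====
-- def categorize_severity(categories):
--     saw_medium = False
--     for c in categories:
--         if c == "hate_speech":
--             return "high"
--         if c == "explicit_content":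
--             saw_medium = True
--     return "medium" if saw_medium else "low"
-- ===== Notes on version B (the rewrite author's own statement) =====
-- stated objective: alternative
-- what changed: Replaces the intermediate mapped-severities list plus staged membership scans by one short-circuiting pass over the raw category names with an early return on 'hate_speech' and a boolean flag for 'explicit_content'; no mapping dict or list is built.
import Mathlib
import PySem

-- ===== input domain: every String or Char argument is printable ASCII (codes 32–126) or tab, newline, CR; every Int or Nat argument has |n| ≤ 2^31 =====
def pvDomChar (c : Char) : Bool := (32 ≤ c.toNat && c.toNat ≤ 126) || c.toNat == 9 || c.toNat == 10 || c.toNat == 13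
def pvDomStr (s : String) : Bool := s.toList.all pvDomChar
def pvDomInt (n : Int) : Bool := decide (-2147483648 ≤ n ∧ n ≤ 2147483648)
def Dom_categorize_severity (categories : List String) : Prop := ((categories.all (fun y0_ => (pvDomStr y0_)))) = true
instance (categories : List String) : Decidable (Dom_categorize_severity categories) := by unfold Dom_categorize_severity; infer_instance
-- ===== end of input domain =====

-- B replaces the mapped-severities list and staged membership scans by one short-circuiting pass with an early return and a flag (objective: alternative).


-- ===== PORT A =====
def pvSevMapping : PySem.Dict String String :=
  (PySem.Dict.empty.insert "hate_speech" "high" |>.insert "explicit_content" "medium" |>.insert "misinformation" "low")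

def categorize_severity (categories : List String) : String :=
  let severities := categories.map (fun cat => pvSevMapping.getD cat "low")
  if severities.contains "high" then "high"
  else if severities.contains "medium" then "medium"
  else "low"

-- ===== PORT B =====
-- one pass over the raw names: early return on "hate_speech", flag for "explicit_content"
def pvLoopB : List String → Bool → String
  | [], sawMedium => if sawMedium then "medium" else "low"
  | c :: rest, sawMedium =>
    if c = "hate_speech" then "high"
    else if c = "explicit_content" then pvLoopB rest true
    else pvLoopB rest sawMedium

def categorize_severity_alt (categories : List String) : String :=
  pvLoopB categories false

-- ===== PRECONDITION & SPEC =====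
def Spec_categorize_severity (categories : List String) (out : String) : Prop := out = categorize_severity_alt categories
instance (categories : List String) (out : String) : Decidable (Spec_categorize_severity categories out) := by unfold Spec_categorize_severity; infer_instance

-- ===== CLAIM (what is proved, stated in full; the proofs are below) =====
def Claim_equal_categorize_severity : Prop := ∀ (categories : List String), Dom_categorize_severity categories → Spec_categorize_severity categories (categorize_severity categories)

-- ===== LEMMAS AND PROOFS =====

theorem pvLoopB_char (l : List String) (saw : Bool) :
    pvLoopB l saw =
      if l.contains "hate_speech" then "high"
      else if l.contains "explicit_content" || saw then "medium"
      else "low" := by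
  induction l generalizing saw with
  | nil => cases saw <;> simp [pvLoopB]
  | cons c rest ih =>
    simp only [pvLoopB, List.contains_cons]
    by_cases h1 : c = "hate_speech"
    · subst h1; simp
    · by_cases h2 : c = "explicit_content"
      · subst h2
        rw [if_neg h1, if_pos rfl, ih]
        simp
      · rw [if_neg h1, if_neg h2, ih]
        have e1 : ("hate_speech" == c) = false := by simp [Ne.symm h1]
        have e2 : ("explicit_content" == c) = false := by simp [Ne.symm h2]
        simp [e1, e2]

theorem pvMap_high (l : List String) :
    (l.map (fun cat => pvSevMapping.getD cat "low")).contains "high" = l.contains "hate_speech" := by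
  induction l with
  | nil => simp
  | cons c rest ih =>
    simp only [List.map_cons, List.contains_cons, ih]
    congr 1
    by_cases h1 : c = "hate_speech"
    · subst h1; decide
    · by_cases h2 : c = "explicit_content"
      · subst h2; simp; decide
      · by_cases h3 : c = "misinformation"
        · subst h3; simp; decide
        · have : pvSevMapping.getD c "low" = "low" := by
            simp [pvSevMapping, PySem.Dict.getD, PySem.Dict.get?, PySem.Dict.insert,
              PySem.Dict.empty, Ne.symm h1, Ne.symm h2, Ne.symm h3]
          simp [this, Ne.symm h1]

theorem pvMap_medium (l : List String) :
    (l.map (fun cat => pvSevMapping.getD cat "low")).contains "medium" = l.contains "explicit_content" := by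
  induction l with
  | nil => simp
  | cons c rest ih =>
    simp only [List.map_cons, List.contains_cons, ih]
    congr 1
    by_cases h1 : c = "hate_speech"
    · subst h1; simp; decide
    · by_cases h2 : c = "explicit_content"
      · subst h2; decide
      · by_cases h3 : c = "misinformation"
        · subst h3; simp; decide
        · have : pvSevMapping.getD c "low" = "low" := by
            simp [pvSevMapping, PySem.Dict.getD, PySem.Dict.get?, PySem.Dict.insert,
              PySem.Dict.empty, Ne.symm h1, Ne.symm h2, Ne.symm h3]
          simp [this, Ne.symm h2]

-- ===== VERDICT (by name: the statement is the Claim_ definition above) =====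
theorem categorize_severity_spec : Claim_equal_categorize_severity := by
  intro categories _
  show categorize_severity categories = categorize_severity_alt categories
  simp only [categorize_severity, categorize_severity_alt]
  rw [pvLoopB_char, pvMap_high, pvMap_medium]
  simp
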